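-- pv_equiv track=rewrite | github.com/MarceloBD/sistemasInteligentes | main.py | get_classes_occurrencies
-- ===== SOURCE A (Python) =====
-- def get_all_classes(bag_of_words):
--     classes_dict = {}
--     for doc_name in bag_of_words:
--         doc = bag_of_words[doc_name]
--         classes_dict[doc['class']] = True
--     classes_list = []
--     for classname in classes_dict:
--         classes_list.append(classname)
--     return classes_list
--
-- def get_classes_occurrencies(bag_of_words):
--     classes = get_all_classes(bag_of_words)
--     occurrencies = {}
--     for classname in classes:
--         occurrencies[classname] = 0
--     for filename in bag_of_words:
--         doc = bag_of_words[filename]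
--         occurrencies[doc['class']] += 1
--     return occurrencies
-- ===== SOURCE B (Python) =====
-- def get_classes_occurrencies(bag_of_words):
--     # Single pass: discover classes and count them in one loop over the values.
--     occurrencies = {}
--     for doc in bag_of_words.values():
--         classname = doc['class']
--         occurrencies[classname] = occurrencies.get(classname, 0) + 1
--     return occurrencies
-- ===== Notes on version B (the rewrite author's own statement) =====
-- stated objective: simpler
-- what changed: Replaced A's three passes (collect distinct classes via a helper dict, zero-initialise a counts dict, then count) by one pass over the values that discovers and counts classes simultaneously with dict.get.
import Mathlib
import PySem

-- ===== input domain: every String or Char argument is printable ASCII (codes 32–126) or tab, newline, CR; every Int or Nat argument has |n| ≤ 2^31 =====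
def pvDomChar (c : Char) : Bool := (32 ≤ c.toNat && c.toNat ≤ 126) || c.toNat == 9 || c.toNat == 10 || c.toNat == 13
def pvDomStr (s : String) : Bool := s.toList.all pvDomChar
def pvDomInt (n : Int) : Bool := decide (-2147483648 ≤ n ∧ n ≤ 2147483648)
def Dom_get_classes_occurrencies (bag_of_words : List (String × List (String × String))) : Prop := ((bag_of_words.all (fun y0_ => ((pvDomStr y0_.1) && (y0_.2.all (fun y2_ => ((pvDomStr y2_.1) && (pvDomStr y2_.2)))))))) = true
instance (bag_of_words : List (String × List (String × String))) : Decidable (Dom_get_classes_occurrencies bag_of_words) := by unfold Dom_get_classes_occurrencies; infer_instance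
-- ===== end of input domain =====

-- B replaces A's three passes (class discovery, zero-init, count) by ONE counting pass over the values (objective: simpler).

-- ===== PORT A =====
def get_all_classes (bag_of_words : List (String × List (String × String))) : List String :=
  let classes_dict : PySem.Dict String Bool :=
    bag_of_words.foldl (fun d p =>
      match (PySem.Dict.mk bag_of_words).get? p.1 with            -- doc = bag_of_words[doc_name]
      | some doc =>
        match (PySem.Dict.mk doc).get? "class" with               -- doc['class']; none = KeyError, outside Pre_
        | some c => d.insert c true
        | none => d
      | none => d) PySem.Dict.empty
  classes_dict.keys.foldl (fun acc c => acc ++ [c]) []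

def get_classes_occurrencies (bag_of_words : List (String × List (String × String))) : List (String × Int) :=
  let classes := get_all_classes bag_of_words
  let occ0 : PySem.Dict String Int := classes.foldl (fun d c => d.insert c 0) PySem.Dict.empty
  let occ : PySem.Dict String Int :=
    bag_of_words.foldl (fun d p =>
      match (PySem.Dict.mk bag_of_words).get? p.1 with            -- doc = bag_of_words[filename]
      | some doc =>
        match (PySem.Dict.mk doc).get? "class" with               -- doc['class']; none = KeyError, outside Pre_
        | some c => d.modify c 0 (· + 1)                          -- occurrencies[c] += 1 (key present after init)
        | none => d
      | none => d) occ0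
  occ.items

-- ===== PORT B =====
def get_classes_occurrencies_alt (bag_of_words : List (String × List (String × String))) : List (String × Int) :=
  (bag_of_words.foldl (fun d p =>
      match (PySem.Dict.mk p.2).get? "class" with                 -- doc['class']; none = KeyError, outside Pre_
      | some c => d.insert c (d.getD c 0 + 1)                     -- occurrencies[c] = occurrencies.get(c, 0) + 1
      | none => d) (PySem.Dict.empty : PySem.Dict String Int)).items

-- ===== PRECONDITION & SPEC =====
-- Pre_ excludes (a) duplicate outer keys, which cannot arise from a Python dict argument, and
-- (b) documents lacking the 'class' key, on which A (and B) raise KeyError.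
def Pre_get_classes_occurrencies (bag_of_words : List (String × List (String × String))) : Prop :=
  (bag_of_words.map (·.1)).Nodup ∧
  ∀ p ∈ bag_of_words, ((PySem.Dict.mk p.2).get? "class").isSome = true
instance (bag_of_words : List (String × List (String × String))) : Decidable (Pre_get_classes_occurrencies bag_of_words) := by unfold Pre_get_classes_occurrencies; infer_instance

def pvWitness_get_classes_occurrencies : (List (String × List (String × String))) :=
  [("d1", [("class", "a")]), ("d2", [("class", "b")]), ("d3", [("class", "a")])]

def Spec_get_classes_occurrencies (bag_of_words : List (String × List (String × String))) (out : List (String × Int)) : Prop := out = get_classes_occurrencies_alt bag_of_words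
instance (bag_of_words : List (String × List (String × String))) (out : List (String × Int)) : Decidable (Spec_get_classes_occurrencies bag_of_words out) := by unfold Spec_get_classes_occurrencies; infer_instance

-- ===== CLAIM (what is proved, stated in full; the proofs are below) =====
def Claim_equal_get_classes_occurrencies : Prop := ∀ (bag_of_words : List (String × List (String × String))), Dom_get_classes_occurrencies bag_of_words → Pre_get_classes_occurrencies bag_of_words → Spec_get_classes_occurrencies bag_of_words (get_classes_occurrencies bag_of_words)

-- ===== LEMMAS AND PROOFS =====

-- the class of a document (defined for documents whose 'class' lookup succeeds)
def pvClsOf (p : String × List (String × String)) : String :=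
  ((PySem.Dict.mk p.2).get? "class").getD ""

lemma pvCls_some {p : String × List (String × String)}
    (h : ((PySem.Dict.mk p.2).get? "class").isSome = true) :
    (PySem.Dict.mk p.2).get? "class" = some (pvClsOf p) := by
  unfold pvClsOf
  cases hc : (PySem.Dict.mk p.2).get? "class" with
  | none => rw [hc] at h; simp at h
  | some c => simp

lemma pvLookup_self {bag : List (String × List (String × String))}
    (hnd : (bag.map (·.1)).Nodup) {p : String × List (String × String)} (hp : p ∈ bag) :
    (PySem.Dict.mk bag).get? p.1 = some p.2 :=
  PySem.Dict.get?_of_mem_items (d := PySem.Dict.mk bag) hp hnd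

lemma pv_getD_foldl_insert_zero (l : List String) (d : PySem.Dict String Int) (v : String)
    (h : d.getD v 0 = 0) : (l.foldl (fun d c => d.insert c (0 : Int)) d).getD v 0 = 0 := by
  induction l generalizing d with
  | nil => exact h
  | cons x xs ih =>
      simp only [List.foldl_cons]
      exact ih _ (by rw [PySem.Dict.getD_insert]; split <;> simp [h])

theorem get_classes_occurrencies_spec : Claim_equal_get_classes_occurrencies := by
  intro bag _ hpre
  obtain ⟨hnd, hcls⟩ := hpre
  unfold Spec_get_classes_occurrencies get_classes_occurrencies get_classes_occurrencies_alt get_all_classes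
  dsimp only
  -- rewrite all three fold bodies using pvClsOf
  have h1 : bag.foldl (fun (d : PySem.Dict String Bool) p =>
      match (PySem.Dict.mk bag).get? p.1 with
      | some doc => match (PySem.Dict.mk doc).get? "class" with
        | some c => d.insert c true
        | none => d
      | none => d) PySem.Dict.empty
      = bag.foldl (fun d p => d.insert (pvClsOf p) true) PySem.Dict.empty :=
    PySem.List.foldl_congr_mem _ _ _ _ (fun d p hp => by
      rw [pvLookup_self hnd hp]; dsimp only; rw [pvCls_some (hcls p hp)])
  have h2 : ∀ d0 : PySem.Dict String Int, bag.foldl (fun d p =>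
      match (PySem.Dict.mk bag).get? p.1 with
      | some doc => match (PySem.Dict.mk doc).get? "class" with
        | some c => d.modify c 0 (· + 1)
        | none => d
      | none => d) d0
      = bag.foldl (fun d p => d.modify (pvClsOf p) 0 (· + 1)) d0 := fun d0 =>
    PySem.List.foldl_congr_mem _ _ _ _ (fun d p hp => by
      rw [pvLookup_self hnd hp]; dsimp only; rw [pvCls_some (hcls p hp)])
  have h3 : bag.foldl (fun (d : PySem.Dict String Int) p =>
      match (PySem.Dict.mk p.2).get? "class" with
      | some c => d.insert c (d.getD c 0 + 1)
      | none => d) PySem.Dict.empty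
      = bag.foldl (fun d p => d.insert (pvClsOf p) (d.getD (pvClsOf p) 0 + 1)) PySem.Dict.empty :=
    PySem.List.foldl_congr_mem _ _ _ _ (fun d p hp => by
      rw [pvCls_some (hcls p hp)])
  rw [h1, h2, h3]
  rw [← List.foldl_map (f := pvClsOf)
        (g := fun (d : PySem.Dict String Int) c => d.modify c 0 (· + 1)),
      ← List.foldl_map (f := pvClsOf)
        (g := fun (d : PySem.Dict String Int) c => d.insert c (d.getD c 0 + 1))]
  set cls := bag.map pvClsOf with hclsdef
  rw [PySem.Dict.foldl_insert_getD_add_one_eq_counter]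
  -- the class list A computes is set(cls)
  have hkeys : (bag.foldl (fun (d : PySem.Dict String Bool) p => d.insert (pvClsOf p) true)
      PySem.Dict.empty).keys = PySem.Set.ofList cls := by
    rw [PySem.Dict.keys_foldl_insert_key, PySem.Dict.keys_empty, PySem.Set.update_nil_left, hclsdef]
  rw [hkeys, PySem.List.foldl_append_singleton_eq_self, List.nil_append]
  -- both sides are dicts with the same keys and the same counts
  congr 1
  apply PySem.Dict.ext
  have hnd0 : ((PySem.Set.ofList cls).foldl (fun (d : PySem.Dict String Int) c => d.insert c 0)
      PySem.Dict.empty).keys.Nodup :=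
    PySem.Dict.nodup_keys_foldl_insert _ (fun _ _ => 0) _ PySem.Dict.nodup_keys_empty
  have hndA : ((cls.foldl (fun (d : PySem.Dict String Int) c => d.modify c 0 (· + 1))
      ((PySem.Set.ofList cls).foldl (fun d c => d.insert c 0) PySem.Dict.empty))).keys.Nodup :=
    PySem.Dict.nodup_keys_foldl_modify_key cls (fun x => x) 0 (fun _ _ => (· + 1)) _ hnd0
  rw [PySem.Dict.items_eq_map_keys _ hndA (0 : Int),
      PySem.Dict.items_eq_map_keys _ (PySem.Dict.nodup_keys_counter cls) (0 : Int)]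
  have hk0 : ((PySem.Set.ofList cls).foldl (fun (d : PySem.Dict String Int) c => d.insert c 0)
      PySem.Dict.empty).keys = PySem.Set.ofList cls := by
    rw [PySem.Dict.keys_foldl_insert, PySem.Dict.keys_empty, PySem.Set.update_nil_left,
        PySem.Set.ofList_ofList]
  have hkA : ((cls.foldl (fun (d : PySem.Dict String Int) c => d.modify c 0 (· + 1))
      ((PySem.Set.ofList cls).foldl (fun d c => d.insert c 0) PySem.Dict.empty))).keys
      = PySem.Set.ofList cls := by
    rw [PySem.Dict.keys_foldl_modify, hk0, PySem.Set.update_eq_append_filter,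
        List.filter_eq_nil_iff.mpr, List.append_nil]
    intro y hy
    simp only [Bool.not_eq_true', Bool.not_eq_false]
    simp
    exact (PySem.Set.mem_ofList _ _).mp hy
  rw [hkA, PySem.Dict.keys_counter]
  apply List.map_congr_left
  intro k _
  rw [PySem.Dict.getD_foldl_modify_add_one, pv_getD_foldl_insert_zero _ _ _ (by simp [PySem.Dict.getD_empty]),
      PySem.Dict.getD_counter, zero_add]

-- ===== VERDICT (by name: the statement is the Claim_ definition above) =====
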